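-- pv_equiv track=rewrite | github.com/xiaoshanhe003/SI507-final-project | present.py | build_state_list
-- ===== SOURCE A (Python) =====
-- def build_state_list(states:list):
--     temp = []
--     width = 12
--     for index,item in enumerate(states):
--         if index%4==0 and index != 0:
--             temp.append("\n")
--         temp.append(f'''[{index+1}] {item.capitalize()}{" "*(width - len(item))}''')
--     return "".join(temp)
-- ===== SOURCE B (Python) =====
-- def build_state_list(states: list):
--     width = 12
--     rows = []
--     for start in range(0, len(states), 4):
--         group = states[start:start + 4]
--         row = "".join(
--             f'[{start + i + 1}] {item.capitalize()}{" " * (width - len(item))}'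
--             for i, item in enumerate(group)
--         )
--         rows.append(row)
--     return "\n".join(rows)
-- ===== Notes on version B (the rewrite author's own statement) =====
-- stated objective: alternative
-- what changed: B replaces A's single flat pass that injects a newline cell before every 4th item with an explicit row decomposition: it slices the states into consecutive groups of four, joins each group's formatted cells into one row string, and joins the rows with '\n'.
import Mathlib
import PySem

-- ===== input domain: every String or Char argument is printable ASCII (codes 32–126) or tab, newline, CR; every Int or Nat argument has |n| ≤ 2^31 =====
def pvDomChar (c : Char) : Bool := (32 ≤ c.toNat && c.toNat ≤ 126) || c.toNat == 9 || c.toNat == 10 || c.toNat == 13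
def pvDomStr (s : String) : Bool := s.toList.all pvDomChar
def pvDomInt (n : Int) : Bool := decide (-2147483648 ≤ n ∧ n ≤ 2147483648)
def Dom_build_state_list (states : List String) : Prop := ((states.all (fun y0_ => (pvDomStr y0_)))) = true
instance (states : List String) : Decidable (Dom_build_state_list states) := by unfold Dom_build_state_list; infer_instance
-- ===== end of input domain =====

-- B regroups the single flat pass (newline injected before every 4th cell) into explicit
-- rows of four joined with "\n" — a different decomposition, same output (objective: alternative).

-- ===== PORT A =====
-- item.capitalize(): first char title-cased, rest lowered — exact on the ASCII domain
def pvCapitalize (cs : List Char) : List Char :=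
  match cs with
  | [] => []
  | c :: rest => PySem.Chars.upperChar c :: PySem.Chars.lower rest

-- f'[{index+1}] {item.capitalize()}{" "*(12 - len(item))}' as a char list;
-- List.replicate's Nat subtraction clamps at 0 exactly as Python's " "*(negative) = ""
def pvCell (index : Int) (item : String) : List Char :=
  ('[' :: PySem.Int.toChars (index + 1)) ++
    (']' :: ' ' :: pvCapitalize item.toList) ++
    List.replicate (12 - item.toList.length) ' '

def build_state_list (states : List String) : String :=
  let temp := (PySem.List.enumerate states).foldl
    (fun (temp : List (List Char)) (p : Int × String) =>
      let temp := if PySem.Int.mod p.1 4 = 0 ∧ p.1 ≠ 0 then temp ++ [['\n']] else temp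
      temp ++ [pvCell p.1 p.2]) []
  String.ofList (PySem.Chars.join [] temp)   -- "".join(temp)

-- ===== PORT B =====
-- one row: ''.join of the cells of a group, with global 1-based numbering from start
def pvRow (start : Int) (group : List String) : List Char :=
  PySem.Chars.join [] ((PySem.List.enumerate group).map (fun p => pvCell (start + p.1) p.2))

def build_state_list_alt (states : List String) : String :=
  let rows := (PySem.List.pyRange 0 (states.length : Int) 4).foldl
    (fun (rows : List (List Char)) (start : Int) =>
      let group := PySem.List.slice states (some start) (some (start + 4))
      rows ++ [pvRow start group]) []
  String.ofList (PySem.Chars.join ['\n'] rows)   -- "\n".join(rows)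

-- ===== PRECONDITION & SPEC =====
def Spec_build_state_list (states : List String) (out : String) : Prop := out = build_state_list_alt states
instance (states : List String) (out : String) : Decidable (Spec_build_state_list states out) := by unfold Spec_build_state_list; infer_instance

-- ===== CLAIM (what is proved, stated in full; the proofs are below) =====
def Claim_equal_build_state_list : Prop := ∀ (states : List String), Dom_build_state_list states → Spec_build_state_list states (build_state_list states)

-- ===== LEMMAS AND PROOFS =====

-- A's produced cell list from global index j on
def pvProd : Nat → List String → List (List Char)
  | _, [] => []
  | j, x :: xs =>
      (if j % 4 = 0 ∧ j ≠ 0 then [['\n']] else []) ++ (pvCell (j : Int) x :: pvProd (j + 1) xs)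

-- B's rows from start index s on (chunks of 4)
def pvRowsF : Nat → List String → List (List Char)
  | _, [] => []
  | s, [a] => [pvRow (s : Int) [a]]
  | s, [a, b] => [pvRow (s : Int) [a, b]]
  | s, [a, b, c] => [pvRow (s : Int) [a, b, c]]
  | s, a :: b :: c :: d :: rest => pvRow (s : Int) [a, b, c, d] :: pvRowsF (s + 4) rest

lemma pvRowsF_nil_iff (s : Nat) (ys : List String) : pvRowsF s ys = [] ↔ ys = [] := by
  rcases ys with _ | ⟨a, _ | ⟨b, _ | ⟨c, _ | ⟨d, rest⟩⟩⟩⟩ <;> simp [pvRowsF]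

lemma pvRowsF_step (s : Nat) (ys : List String) (h : ys ≠ []) :
    pvRowsF s ys = pvRow (s : Int) (ys.take 4) :: pvRowsF (s + 4) (ys.drop 4) := by
  rcases ys with _ | ⟨a, _ | ⟨b, _ | ⟨c, _ | ⟨d, rest⟩⟩⟩⟩ <;> simp_all [pvRowsF]

lemma join_empty_sep (p : List Char) (rest : List (List Char)) :
    PySem.Chars.join [] (p :: rest) = p ++ PySem.Chars.join [] rest := by
  cases rest with
  | nil => simp [PySem.Chars.join_singleton, PySem.Chars.join_nil]
  | cons q more => rw [PySem.Chars.join_cons_cons]; simp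

lemma join_nl_cons (p : List Char) (rest : List (List Char)) :
    PySem.Chars.join ['\n'] (p :: rest) =
      p ++ (if rest = [] then [] else '\n' :: PySem.Chars.join ['\n'] rest) := by
  cases rest with
  | nil => simp [PySem.Chars.join_singleton]
  | cons q more => rw [PySem.Chars.join_cons_cons]; simp

lemma A_fold (ys : List String) : ∀ (j : Nat) (temp : List (List Char)),
    (PySem.List.enumerate ys (j : Int)).foldl
      (fun (temp : List (List Char)) (p : Int × String) =>
        let temp := if PySem.Int.mod p.1 4 = 0 ∧ p.1 ≠ 0 then temp ++ [['\n']] else temp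
        temp ++ [pvCell p.1 p.2]) temp
      = temp ++ pvProd j ys := by
  induction ys with
  | nil => intro j temp; simp [PySem.List.enumerate_nil, pvProd]
  | cons x xs ih =>
    intro j temp
    rw [PySem.List.enumerate_cons]
    have hcast : ((j : Int) + 1) = ((j + 1 : Nat) : Int) := by push_cast; ring
    have hcond : (PySem.Int.mod (j : Int) 4 = 0 ∧ (j : Int) ≠ 0) ↔ (j % 4 = 0 ∧ j ≠ 0) := by
      rw [show ((4 : Int) = ((4 : Nat) : Int)) by norm_num, PySem.Int.mod_natCast]
      constructor <;> intro ⟨h1, h2⟩ <;> exact ⟨by exact_mod_cast h1, by exact_mod_cast h2⟩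
    simp only [List.foldl_cons, hcast, ih]
    by_cases h : j % 4 = 0 ∧ j ≠ 0
    · rw [if_pos (hcond.mpr h)]
      simp [pvProd, h]
    · rw [if_neg (fun hc => h (hcond.mp hc))]
      simp [pvProd, h]

lemma pyRange_four_nil (a b : Int) (h : b ≤ a) : PySem.List.pyRange a b 4 = [] := by
  rw [PySem.List.pyRange_of_pos a b (by norm_num)]
  rw [if_neg (by omega)]
  simp

lemma pyRange_four_cons (a b : Int) (h : a < b) :
    PySem.List.pyRange a b 4 = a :: PySem.List.pyRange (a + 4) b 4 := by
  rw [PySem.List.pyRange_of_pos a b (by norm_num), PySem.List.pyRange_of_pos (a + 4) b (by norm_num)]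
  rw [if_pos h]
  have hn : ((b - a + 4 - 1) / 4).toNat =
      (if a + 4 < b then ((b - (a + 4) + 4 - 1) / 4).toNat else 0) + 1 := by
    split_ifs with h4 <;> omega
  rw [hn, List.range_succ_eq_map]
  simp only [List.map_cons, List.map_map]
  congr 1
  · simp
  · apply List.map_congr_left
    intro k _
    simp [Function.comp]
    push_cast
    ring

lemma B_fold (states : List String) : ∀ (fuel s : Nat) (rows : List (List Char)),
    states.length ≤ s + fuel →
    (PySem.List.pyRange (s : Int) (states.length : Int) 4).foldl
      (fun (rows : List (List Char)) (start : Int) =>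
        let group := PySem.List.slice states (some start) (some (start + 4))
        rows ++ [pvRow start group]) rows
      = rows ++ pvRowsF s (states.drop s) := by
  intro fuel
  induction fuel with
  | zero =>
    intro s rows hle
    rw [pyRange_four_nil _ _ (by exact_mod_cast hle)]
    rw [List.drop_eq_nil_of_le (by omega)]
    simp [pvRowsF]
  | succ n ih =>
    intro s rows hle
    by_cases hs : states.length ≤ s
    · rw [pyRange_four_nil _ _ (by exact_mod_cast hs)]
      rw [List.drop_eq_nil_of_le hs]
      simp [pvRowsF]
    · push_neg at hs
      rw [pyRange_four_cons _ _ (by exact_mod_cast hs)]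
      rw [List.foldl_cons]
      have hgrp : PySem.List.slice states (some (s : Int)) (some ((s : Int) + 4)) =
          (states.drop s).take 4 := by
        have := PySem.List.slice_natCast_add states s 4
        simpa using this
      have hc4 : ((s : Int) + 4) = ((s + 4 : Nat) : Int) := by push_cast; ring
      rw [hc4, ih (s + 4) _ (by omega), ← hc4, hgrp]
      rw [pvRowsF_step s _ (by rw [Ne, List.drop_eq_nil_iff]; omega)]
      simp

-- the heart: the flat pass with injected newlines equals the rows joined by '\n'
lemma main_lemma : ∀ (fuel : Nat) (ys : List String) (k : Nat), ys.length ≤ fuel →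
    PySem.Chars.join [] (pvProd (4 * k) ys) =
      (if k ≠ 0 ∧ ys ≠ [] then '\n' :: PySem.Chars.join ['\n'] (pvRowsF (4 * k) ys)
       else PySem.Chars.join ['\n'] (pvRowsF (4 * k) ys)) := by
  intro fuel
  induction fuel with
  | zero =>
    intro ys k hle
    have : ys = [] := List.length_eq_zero_iff.mp (by omega)
    subst this
    simp [pvProd, pvRowsF, PySem.Chars.join_nil]
  | succ n ih =>
    intro ys k hle
    rcases ys with _ | ⟨a, ys1⟩
    · simp [pvProd, pvRowsF, PySem.Chars.join_nil]
    · -- unroll the first (≤4)-chunk of pvProd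
      have h0 : (4 * k) % 4 = 0 := by omega
      have h1 : ¬ ((4 * k + 1) % 4 = 0 ∧ 4 * k + 1 ≠ 0) := by omega
      have h2 : ¬ ((4 * k + 2) % 4 = 0 ∧ 4 * k + 2 ≠ 0) := by omega
      have h3 : ¬ ((4 * k + 3) % 4 = 0 ∧ 4 * k + 3 ≠ 0) := by omega
      rcases ys1 with _ | ⟨b, ys2⟩
      · -- one element
        by_cases hk : k = 0 <;>
          simp [pvProd, pvRowsF, pvRow, hk, h1, PySem.List.enumerate_cons,
            PySem.List.enumerate_nil, join_empty_sep, PySem.Chars.join_nil,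
            PySem.Chars.join_singleton]
      · rcases ys2 with _ | ⟨c, ys3⟩
        · by_cases hk : k = 0 <;>
            simp [pvProd, pvRowsF, pvRow, hk, h1, h2, PySem.List.enumerate_cons,
              PySem.List.enumerate_nil, join_empty_sep, PySem.Chars.join_nil,
              PySem.Chars.join_singleton] <;>
            (try push_cast) <;> (try ring_nf) <;> (try simp [Nat.mul_comm])
        · rcases ys3 with _ | ⟨d, rest⟩
          · by_cases hk : k = 0 <;>
              simp [pvProd, pvRowsF, pvRow, hk, h1, h2, h3, PySem.List.enumerate_cons,
                PySem.List.enumerate_nil, join_empty_sep, PySem.Chars.join_nil,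
                PySem.Chars.join_singleton] <;>
              (try push_cast) <;> (try ring_nf) <;> (try simp [Nat.mul_comm])
          · -- four or more: recurse on the tail with k+1
            have hrec := ih rest (k + 1) (by simp at hle ⊢; omega)
            have hsucc : 4 * k + 3 + 1 = 4 * (k + 1) := by ring
            have hknz : ¬ (k + 1 = 0) := by omega
            by_cases hrest : rest = []
            · subst hrest
              simp only [pvProd, h1, h2, h3, hsucc] at *
              by_cases hk : k = 0 <;>
                simp [pvProd, pvRowsF, pvRow, hk, h0, hrec, PySem.List.enumerate_cons,
                  PySem.List.enumerate_nil, join_empty_sep, join_nl_cons,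
                  PySem.Chars.join_nil, PySem.Chars.join_singleton] <;>
                (try push_cast) <;> (try ring_nf) <;> (try simp [Nat.mul_comm])
            · have hidx : 4 * (k + 1) = 4 * k + 4 := by ring
              rw [hidx, if_pos (show k + 1 ≠ 0 ∧ rest ≠ [] from ⟨by omega, hrest⟩)] at hrec
              simp only [pvProd, h1, h2, h3, hsucc] at *
              rcases Nat.eq_zero_or_pos k with hk | hk
              · subst hk
                norm_num at hrec
                simp [pvProd, pvRowsF, pvRow, hrec, hrest, pvRowsF_nil_iff,
                  PySem.List.enumerate_cons, PySem.List.enumerate_nil, join_empty_sep,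
                  join_nl_cons, PySem.Chars.join_nil, PySem.Chars.join_singleton] <;>
                (try push_cast) <;> (try ring_nf) <;> (try simp [Nat.mul_comm])
              · have hk' : ¬ k = 0 := by omega
                simp [pvProd, pvRowsF, pvRow, hk', hrec, hrest, pvRowsF_nil_iff,
                  PySem.List.enumerate_cons, PySem.List.enumerate_nil, join_empty_sep,
                  join_nl_cons, PySem.Chars.join_nil, PySem.Chars.join_singleton] <;>
                (try push_cast) <;> (try ring_nf) <;> (try simp [Nat.mul_comm, pvRowsF_nil_iff, hrest])

-- ===== VERDICT (by name: the statement is the Claim_ definition above) =====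
theorem build_state_list_spec : Claim_equal_build_state_list := by
  intro states _
  unfold Spec_build_state_list build_state_list build_state_list_alt
  have hA := A_fold states 0 []
  have hB := B_fold states states.length 0 [] (by omega)
  simp only [Nat.cast_zero] at hA hB
  rw [hA, hB]
  have hM := main_lemma states.length states 0 (le_refl _)
  simp only [Nat.mul_zero, ne_eq, not_true_eq_false, false_and, if_false] at hM
  simp only [List.nil_append, List.drop_zero]
  rw [hM]
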